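-- pv_equiv track=rewrite | github.com/N0SO/moqputils | cabrilloutils/CabrilloUtils.py | IsThisACabFile
-- ===== SOURCE A (Python) =====
-- def IsThisACabFile(data):
--     cabfile = False
--     if(data):
--         if ( (any ('START-OF-LOG:' in string for string in data)) and
--           (any ('CALLSIGN:' in string for string in data)) and
--           (any ('QSO:' in string for string in data)) and
--           (any ('END-OF-LOG:' in string for string in data)) ):
--             cabfile = True
--     return cabfile
-- ===== SOURCE B (Python) =====
-- def IsThisACabFile(data):
--     if not data:
--         return False
--     seen_start = seen_call = seen_qso = seen_end = False
--     for line in data: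
--         if not seen_start and 'START-OF-LOG:' in line:
--             seen_start = True
--         if not seen_call and 'CALLSIGN:' in line:
--             seen_call = True
--         if not seen_qso and 'QSO:' in line:
--             seen_qso = True
--         if not seen_end and 'END-OF-LOG:' in line:
--             seen_end = True
--         if seen_start and seen_call and seen_qso and seen_end:
--             return True
--     return False
-- ===== Notes on version B (the rewrite author's own statement) =====
-- stated objective: alternative
-- what changed: Replaces four separate any()-scans over the whole list with a single pass maintaining four seen-flags and breaking out as soon as all four markers have been found; measured timing shows no speedup (C-level any() scans are cheap), so this is an alternative single-pass formulation, not a faster one.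
import Mathlib
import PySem

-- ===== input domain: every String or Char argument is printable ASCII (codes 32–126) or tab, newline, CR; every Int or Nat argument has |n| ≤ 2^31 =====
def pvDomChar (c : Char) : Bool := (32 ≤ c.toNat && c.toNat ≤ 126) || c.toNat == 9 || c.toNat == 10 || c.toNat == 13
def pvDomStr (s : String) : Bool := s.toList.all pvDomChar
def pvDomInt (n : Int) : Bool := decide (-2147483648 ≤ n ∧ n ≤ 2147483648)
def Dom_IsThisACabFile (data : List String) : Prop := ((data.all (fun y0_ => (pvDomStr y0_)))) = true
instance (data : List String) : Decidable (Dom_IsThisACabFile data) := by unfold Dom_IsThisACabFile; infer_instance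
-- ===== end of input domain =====

-- B does one pass with four seen-flags and an early break instead of A's four full any()-scans (alternative single-pass formulation, same cost).

-- ===== PORT A =====
def IsThisACabFile (data : List String) : Bool :=
  let cabfile := false
  if data ≠ [] then
    if (data.any (fun s => PySem.Str.isIn "START-OF-LOG:" s)) &&
       (data.any (fun s => PySem.Str.isIn "CALLSIGN:" s)) &&
       (data.any (fun s => PySem.Str.isIn "QSO:" s)) &&
       (data.any (fun s => PySem.Str.isIn "END-OF-LOG:" s)) then
      true
    else cabfile
  else cabfile

-- ===== PORT B =====
-- the for-loop of Source B: four flags, update each still-missing one, early return when all set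
def cabScan : List String → Bool → Bool → Bool → Bool → Bool
  | [], _, _, _, _ => false
  | line :: rest, seenStart, seenCall, seenQso, seenEnd =>
    let seenStart := if !seenStart && PySem.Str.isIn "START-OF-LOG:" line then true else seenStart
    let seenCall  := if !seenCall  && PySem.Str.isIn "CALLSIGN:" line then true else seenCall
    let seenQso   := if !seenQso   && PySem.Str.isIn "QSO:" line then true else seenQso
    let seenEnd   := if !seenEnd   && PySem.Str.isIn "END-OF-LOG:" line then true else seenEnd
    if seenStart && seenCall && seenQso && seenEnd then true
    else cabScan rest seenStart seenCall seenQso seenEnd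

def IsThisACabFile_alt (data : List String) : Bool :=
  if data = [] then false
  else cabScan data false false false false

-- ===== PRECONDITION & SPEC =====
def Spec_IsThisACabFile (data : List String) (out : Bool) : Prop := out = IsThisACabFile_alt data
instance (data : List String) (out : Bool) : Decidable (Spec_IsThisACabFile data out) := by unfold Spec_IsThisACabFile; infer_instance

-- ===== CLAIM (what is proved, stated in full; the proofs are below) =====
def Claim_equal_IsThisACabFile : Prop := ∀ (data : List String), Dom_IsThisACabFile data → Spec_IsThisACabFile data (IsThisACabFile data)

-- ===== LEMMAS AND PROOFS =====
theorem flag_update (a t : Bool) : (if !a && t then true else a) = (a || t) := by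
  cases a <;> cases t <;> rfl

-- loop invariant: as long as the flags are not yet all set, the scan computes
-- "each flag already set, or its marker occurs in the remaining lines"
theorem cabScan_eq (l : List String) (a b c d : Bool) (h : (a && b && c && d) = false) :
    cabScan l a b c d =
      ((a || l.any (fun s => PySem.Str.isIn "START-OF-LOG:" s)) &&
       (b || l.any (fun s => PySem.Str.isIn "CALLSIGN:" s)) &&
       (c || l.any (fun s => PySem.Str.isIn "QSO:" s)) &&
       (d || l.any (fun s => PySem.Str.isIn "END-OF-LOG:" s))) := by
  induction l generalizing a b c d with
  | nil => simpa [cabScan] using h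
  | cons line rest ih =>
    simp only [cabScan, flag_update, List.any_cons]
    by_cases hall : ((a || PySem.Str.isIn "START-OF-LOG:" line) &&
        (b || PySem.Str.isIn "CALLSIGN:" line) &&
        (c || PySem.Str.isIn "QSO:" line) &&
        (d || PySem.Str.isIn "END-OF-LOG:" line)) = true
    · rw [if_pos hall]
      revert hall
      cases a <;> cases b <;> cases c <;> cases d <;>
        cases PySem.Str.isIn "START-OF-LOG:" line <;>
        cases PySem.Str.isIn "CALLSIGN:" line <;>
        cases PySem.Str.isIn "QSO:" line <;>
        cases PySem.Str.isIn "END-OF-LOG:" line <;> simp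
    · rw [if_neg hall, ih _ _ _ _ (by simpa using hall)]
      simp [Bool.or_assoc]

theorem IsThisACabFile_spec : Claim_equal_IsThisACabFile := by
  intro data _
  unfold Spec_IsThisACabFile IsThisACabFile IsThisACabFile_alt
  cases data with
  | nil => rfl
  | cons x xs =>
    rw [cabScan_eq _ false false false false rfl]
    simp [List.any_eq]
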